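-- pv_equiv track=rewrite | github.com/RWTH-DDM/lungct | lungct/neighbourhood.py | get_neighbours_3d
-- ===== SOURCE A (Python) =====
-- def get_neighbours_3d(shape, coordinates):
--
--     coordinates = list(coordinates)
--
--     for dim in range(0, 3):
--
--         if coordinates[dim] > 0:
--             coordinates[dim] -= 1
--             yield tuple(coordinates)
--             coordinates[dim] += 1
--
--         if coordinates[dim] < (shape[dim] - 1):
--             coordinates[dim] += 1
--             yield tuple(coordinates)
--             coordinates[dim] -= 1
-- ===== SOURCE B (Python) =====
-- def get_neighbours_3d(shape, coordinates):
--     # Recursive decomposition: walk the first three dimensions structurally,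
--     # carrying the already-processed prefix; no indices, no in-place mutation.
--     def go(prefix, sh, co):
--         if not sh:
--             return
--         s = sh[0]
--         c = co[0]
--         rest = co[1:]
--         if c > 0:
--             yield prefix + (c - 1,) + rest
--         if c < s - 1:
--             yield prefix + (c + 1,) + rest
--         yield from go(prefix + (c,), sh[1:], rest)
--
--     yield from go((), (shape[0], shape[1], shape[2]), tuple(coordinates))
-- ===== Notes on version B (the rewrite author's own statement) =====
-- stated objective: alternative
-- what changed: Replaces A's index-based loop with in-place mutate/yield/restore by a structural recursion over the zipped dimension list that carries the processed prefix and rebuilds each neighbour immutably, with no indexing at all.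
import Mathlib
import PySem

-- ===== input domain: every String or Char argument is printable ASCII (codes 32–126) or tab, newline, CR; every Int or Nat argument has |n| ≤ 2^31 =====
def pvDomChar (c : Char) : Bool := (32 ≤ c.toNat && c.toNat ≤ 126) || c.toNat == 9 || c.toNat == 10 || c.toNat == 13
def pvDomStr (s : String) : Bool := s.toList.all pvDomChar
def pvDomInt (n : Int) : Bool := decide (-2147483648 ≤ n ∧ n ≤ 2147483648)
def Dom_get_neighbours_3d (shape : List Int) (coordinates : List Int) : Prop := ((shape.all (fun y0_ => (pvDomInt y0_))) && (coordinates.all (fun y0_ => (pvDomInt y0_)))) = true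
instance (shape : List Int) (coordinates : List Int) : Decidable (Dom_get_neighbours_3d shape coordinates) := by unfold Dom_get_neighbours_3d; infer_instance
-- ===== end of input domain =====

-- B replaces A's index loop with mutate/yield/restore by a structural recursion
-- over the dimensions carrying the processed pre (return value only — A is a
-- generator, its yielded tuples are collected into a list here).


-- ===== PORT A =====
-- one iteration of A's `for dim in range(0, 3)` body: the two guarded yields,
-- with the mutate/yield/restore pattern expressed as List.set at index dim
def pvStepA (shape coordinates : List Int) (dim : Nat) : List (List Int) :=
  let v := coordinates.getD dim 0
  let s := shape.getD dim 0
  (if v > 0 then [coordinates.set dim (v - 1)] else []) ++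
  (if v < s - 1 then [coordinates.set dim (v + 1)] else [])

def get_neighbours_3d (shape : List Int) (coordinates : List Int) : List (List Int) :=
  ([0, 1, 2] : List Nat).foldl (fun acc dim => acc ++ pvStepA shape coordinates dim) []

-- ===== PORT B =====
-- Source B's recursive generator `go(pre, sh, co)`
def pvGoB (pre : List Int) : List Int → List Int → List (List Int)
  | [], _ => []
  | s :: sh, co =>
      let c := co.headD 0
      let rest := co.tail
      (if c > 0 then [pre ++ (c - 1) :: rest] else []) ++
      (if c < s - 1 then [pre ++ (c + 1) :: rest] else []) ++
      pvGoB (pre ++ [c]) sh rest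

def get_neighbours_3d_alt (shape : List Int) (coordinates : List Int) : List (List Int) :=
  pvGoB [] [shape.getD 0 0, shape.getD 1 0, shape.getD 2 0] coordinates

-- ===== PRECONDITION & SPEC =====
-- Pre_ excludes exactly the inputs on which iterating Python A raises IndexError:
-- shape or coordinates shorter than 3.
def Pre_get_neighbours_3d (shape : List Int) (coordinates : List Int) : Prop :=
  3 ≤ shape.length ∧ 3 ≤ coordinates.length
instance (shape : List Int) (coordinates : List Int) : Decidable (Pre_get_neighbours_3d shape coordinates) := by unfold Pre_get_neighbours_3d; infer_instance

def pvWitness_get_neighbours_3d : List Int × List Int := ([3, 3, 3], [1, 1, 1])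

def Spec_get_neighbours_3d (shape : List Int) (coordinates : List Int) (out : List (List Int)) : Prop := out = get_neighbours_3d_alt shape coordinates
instance (shape : List Int) (coordinates : List Int) (out : List (List Int)) : Decidable (Spec_get_neighbours_3d shape coordinates out) := by unfold Spec_get_neighbours_3d; infer_instance

-- ===== CLAIM (what is proved, stated in full; the proofs are below) =====
def Claim_equal_get_neighbours_3d : Prop := ∀ (shape : List Int) (coordinates : List Int), Dom_get_neighbours_3d shape coordinates → Pre_get_neighbours_3d shape coordinates → Spec_get_neighbours_3d shape coordinates (get_neighbours_3d shape coordinates)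

-- ===== LEMMAS AND PROOFS =====
theorem get_neighbours_3d_eq_alt (s0 s1 s2 c0 c1 c2 : Int) (sr cr : List Int) :
    get_neighbours_3d (s0 :: s1 :: s2 :: sr) (c0 :: c1 :: c2 :: cr)
      = get_neighbours_3d_alt (s0 :: s1 :: s2 :: sr) (c0 :: c1 :: c2 :: cr) := by
  simp only [get_neighbours_3d, get_neighbours_3d_alt, pvStepA, pvGoB,
    List.foldl, List.getD, List.set, List.headD, List.tail,
    List.getElem?_cons_zero, List.getElem?_cons_succ,
    Option.getD_some, List.nil_append, List.append_assoc]
  split_ifs <;> simp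

-- ===== VERDICT (by name: the statement is the Claim_ definition above) =====
theorem get_neighbours_3d_spec : Claim_equal_get_neighbours_3d := by
  intro shape coordinates _ hpre
  obtain ⟨hs, hc⟩ := hpre
  match shape, coordinates with
  | s0 :: s1 :: s2 :: sr, c0 :: c1 :: c2 :: cr =>
    exact get_neighbours_3d_eq_alt s0 s1 s2 c0 c1 c2 sr cr
  | [], _ | [_], _ | [_,_], _ => simp at hs
  | _::_::_::_, [] | _::_::_::_, [_] | _::_::_::_, [_,_] => simp at hc
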